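-- pv_equiv track=rewrite | github.com/DanteDeRuwe/fys-ster-programmeren-1 | Reeks08/RijtjesEnGroepen.py | rijtje
-- ===== SOURCE A (Python) =====
-- def rijtje(reeks):
--     '''
--     >>> rijtje(['4R', '4B', '4G', '4Z'])
--     False
--     >>> rijtje({'6B', '7B', '8B', '9B', '10B'})
--     True
--     >>> rijtje(('11R', '2B', '7G', '2B', '9Z'))
--     False
--     '''
--     if len(set(reeks)) != len(reeks) or len(reeks) < 3:
--         return False
--     reeks = list(reeks)
--     eerstekleur = reeks[0][-1]
--     for e in reeks:
--         if e[-1] != eerstekleur: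
--             return False
--     cijferlijst = [int(e[:-1]) for e in reeks]
--     cijferlijst.sort()
--     if [cijferlijst[0]+i for i,_ in enumerate(cijferlijst)] != cijferlijst:
--         return False
--     return True
-- ===== SOURCE B (Python) =====
-- def rijtje(reeks):
--     reeks = list(reeks)
--     n = len(reeks)
--     if n < 3 or len(set(reeks)) != n:
--         return False
--     kleur = reeks[0][-1]
--     if any(e[-1] != kleur for e in reeks):
--         return False
--     nums = [int(e[:-1]) for e in reeks]
--     return len(set(nums)) == n and max(nums) - min(nums) == n - 1
-- ===== Notes on version B (the rewrite author's own statement) =====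
-- stated objective: alternative
-- what changed: B drops A's sort-and-compare-to-an-arithmetic-progression and instead checks that the card numbers are distinct and that max - min = n - 1, with no sort.
import Mathlib
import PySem

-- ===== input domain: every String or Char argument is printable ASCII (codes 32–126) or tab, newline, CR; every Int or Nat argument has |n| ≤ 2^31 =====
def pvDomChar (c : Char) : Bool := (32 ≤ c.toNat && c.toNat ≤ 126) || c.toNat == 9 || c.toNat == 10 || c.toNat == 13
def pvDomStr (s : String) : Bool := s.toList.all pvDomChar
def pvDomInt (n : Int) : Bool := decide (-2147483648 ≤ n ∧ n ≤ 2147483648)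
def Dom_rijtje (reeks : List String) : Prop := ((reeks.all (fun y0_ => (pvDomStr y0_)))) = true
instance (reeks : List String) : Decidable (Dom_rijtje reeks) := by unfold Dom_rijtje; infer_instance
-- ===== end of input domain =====

-- B replaces A's sort-then-compare-to-a-progression by the sort-free check
-- "numbers distinct and max - min = n - 1"; objective: alternative algorithm.

-- ===== PORT A =====
def rijtje (reeks : List String) : Bool :=
  if (PySem.Set.ofList reeks).length ≠ reeks.length ∨ reeks.length < 3 then false
  else
    -- eerstekleur = reeks[0][-1]
    let eerstekleur := PySem.Str.pyGet? (reeks.headD "") (-1)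
    -- for e in reeks: if e[-1] != eerstekleur: return False
    if reeks.all (fun e => PySem.Str.pyGet? e (-1) == eerstekleur) then
      -- cijferlijst = [int(e[:-1]) for e in reeks]  (int() raises outside Pre_; getD 0 unreachable there)
      let cijferlijst := reeks.map (fun e => (PySem.Int.ofStr? (PySem.Str.slice e none (some (-1)))).getD 0)
      -- cijferlijst.sort()
      let s := PySem.List.sorted cijferlijst (fun x => x) false
      -- [cijferlijst[0]+i for i,_ in enumerate(cijferlijst)] != cijferlijst
      if (PySem.List.enumerate s 0).map (fun p => PySem.List.pyGetD s 0 0 + p.1) ≠ s then false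
      else true
    else false

-- ===== PORT B =====
def rijtje_alt (reeks : List String) : Bool :=
  let n := reeks.length
  if n < 3 ∨ (PySem.Set.ofList reeks).length ≠ n then false
  else
    -- kleur = reeks[0][-1]
    let kleur := PySem.Str.pyGet? (reeks.headD "") (-1)
    -- any(e[-1] != kleur for e in reeks)
    if reeks.any (fun e => !(PySem.Str.pyGet? e (-1) == kleur)) then false
    else
      -- nums = [int(e[:-1]) for e in reeks]
      let nums := reeks.map (fun e => (PySem.Int.ofStr? (PySem.Str.slice e none (some (-1)))).getD 0)
      -- len(set(nums)) == n and max(nums) - min(nums) == n - 1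
      ((PySem.Set.ofList nums).length == n) &&
        ((PySem.List.max? nums (fun x => x)).getD 0 - (PySem.List.min? nums (fun x => x)).getD 0 == (n : Int) - 1)

-- ===== PRECONDITION & SPEC =====
-- Pre_ excludes exactly the inputs where the Python raises: an IndexError on an empty card string
-- reached by the colour scan (reeks[0] or the first card the scan visits that breaks the run), or a
-- ValueError from int(e[:-1]) once all cards passed the colour scan.  Both A and B raise exactly there.
def Pre_rijtje (reeks : List String) : Prop :=
  (PySem.Set.ofList reeks).length ≠ reeks.length ∨ reeks.length < 3 ∨
  (reeks.headD "" ≠ "" ∧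
    (let pref := reeks.takeWhile
        (fun e => e ≠ "" && (e.toList.getLast? == (reeks.headD "").toList.getLast?))
     if pref.length = reeks.length
     then ∀ e ∈ reeks, (PySem.Int.ofStr? (PySem.Str.slice e none (some (-1)))).isSome
     else reeks.getD pref.length "" ≠ ""))
instance (reeks : List String) : Decidable (Pre_rijtje reeks) := by unfold Pre_rijtje; infer_instance

def pvWitness_rijtje : List String := ["6B", "7B", "8B"]

def Spec_rijtje (reeks : List String) (out : Bool) : Prop := out = rijtje_alt reeks
instance (reeks : List String) (out : Bool) : Decidable (Spec_rijtje reeks out) := by unfold Spec_rijtje; infer_instance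

-- ===== CLAIM (what is proved, stated in full; the proofs are below) =====
def Claim_equal_rijtje : Prop := ∀ (reeks : List String), Dom_rijtje reeks → Pre_rijtje reeks → Spec_rijtje reeks (rijtje reeks)

-- ===== LEMMAS AND PROOFS =====

theorem setLen_eq_iff_nodup (xs : List Int) :
    (PySem.Set.ofList xs).length = xs.length ↔ xs.Nodup := by
  constructor
  · intro h
    have hsub : xs.dedup.Sublist xs := List.dedup_sublist xs
    have hle : xs.dedup.length ≤ xs.length := hsub.length_le
    have hf : (PySem.Set.ofList xs).toFinset = xs.toFinset := by
      ext a; simp [PySem.Set.mem_ofList]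
    have h1 : (PySem.Set.ofList xs).toFinset.card = (PySem.Set.ofList xs).length :=
      List.toFinset_card_of_nodup (PySem.Set.nodup_ofList xs)
    have h2 : xs.toFinset.card = xs.dedup.length := List.card_toFinset xs
    rw [hf] at h1
    have : xs.dedup.length = xs.length := by omega
    have := hsub.eq_of_length this
    rw [← this]; exact xs.nodup_dedup
  · intro h; rw [PySem.Set.ofList_eq_self_of_nodup xs h]

theorem chainLe (s : List Int) (hp : List.Pairwise (· < ·) s) (i d : Nat) (h : i + d < s.length) :
    s[i]'(by omega) + d ≤ s[i + d]'h := by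
  induction d with
  | zero => simp
  | succ d ih =>
    have h1 : i + d < s.length := by omega
    have hlt : s[i + d]'h1 < s[i + (d + 1)]'h :=
      (List.pairwise_iff_getElem.mp hp) (i+d) (i+(d+1)) h1 h (by omega)
    have hih := ih h1
    push_cast
    push_cast at hih
    omega

theorem chainLe' (s : List Int) (hp : List.Pairwise (· < ·) s) (i j : Nat) (hij : i ≤ j)
    (hj : j < s.length) : s[i]'(by omega) + ((j - i : Nat) : Int) ≤ s[j]'hj := by
  have := chainLe s hp i (j - i) (by omega)
  simpa [show i + (j - i) = j from by omega] using this

theorem enum_char (s : List Int) :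
    ((PySem.List.enumerate s 0).map (fun p => PySem.List.pyGetD s 0 0 + p.1) = s) ↔
      ∀ (k : Nat) (h : k < s.length), s[k] = s.getD 0 0 + k := by
  have hlen : ((PySem.List.enumerate s 0).map (fun p => PySem.List.pyGetD s 0 0 + p.1)).length = s.length := by
    simp [PySem.List.length_enumerate]
  have hget : ∀ (k : Nat) (h : k < s.length),
      ((PySem.List.enumerate s 0).map (fun p => PySem.List.pyGetD s 0 0 + p.1))[k]'(by omega)
        = s.getD 0 0 + k := by
    intro k h
    simp [PySem.List.getElem_enumerate, PySem.List.pyGetD_zero]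
  constructor
  · intro heq k h
    have h2 : k < ((PySem.List.enumerate s 0).map (fun p => PySem.List.pyGetD s 0 0 + p.1)).length := by omega
    have := List.getElem_of_eq heq h2
    rw [hget k h] at this
    exact this.symm
  · intro h
    apply List.ext_getElem hlen
    intro k h1 h2
    rw [hget k h2, h k h2]

theorem core (nums : List Int) (hne : nums ≠ []) :
    ((PySem.List.enumerate (PySem.List.sorted nums (fun x => x) false) 0).map
        (fun p => PySem.List.pyGetD (PySem.List.sorted nums (fun x => x) false) 0 0 + p.1)
      = PySem.List.sorted nums (fun x => x) false)
    ↔ (nums.Nodup ∧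
        (PySem.List.max? nums (fun x => x)).getD 0 - (PySem.List.min? nums (fun x => x)).getD 0
          = (nums.length : Int) - 1) := by
  set s := PySem.List.sorted nums (fun x => x) false with hs
  have hperm : s.Perm nums := PySem.List.sorted_perm nums (fun x => x) false
  have hlen : s.length = nums.length := hperm.length_eq
  have hlpos : 0 < s.length := by
    cases hnn : nums with
    | nil => exact absurd hnn hne
    | cons a t => rw [hlen, hnn]; simp
  obtain ⟨m, hmin⟩ : ∃ m, PySem.List.min? nums (fun x => x) = some m := by
    cases hm : PySem.List.min? nums (fun x => x) with
    | none => exact absurd ((PySem.List.min?_eq_none_iff nums (fun x => x)).mp hm) hne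
    | some m => exact ⟨m, rfl⟩
  obtain ⟨M, hmax⟩ : ∃ M, PySem.List.max? nums (fun x => x) = some M := by
    cases hm : PySem.List.max? nums (fun x => x) with
    | none => exact absurd ((PySem.List.max?_eq_none_iff nums (fun x => x)).mp hm) hne
    | some M => exact ⟨M, rfl⟩
  have hmmem : m ∈ nums := PySem.List.min?_mem hmin
  have hMmem : M ∈ nums := PySem.List.max?_mem hmax
  have hmle : ∀ y ∈ nums, m ≤ y := PySem.List.min?_isMin hmin
  have hMge : ∀ y ∈ nums, y ≤ M := PySem.List.max?_isMax hmax
  have hgetD : s.getD 0 0 = s[0]'hlpos := List.getD_eq_getElem s 0 hlpos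
  rw [hmin, hmax, enum_char s]
  simp only [Option.getD_some]
  constructor
  · intro h
    have hpl : s.Pairwise (· < ·) := by
      rw [List.pairwise_iff_getElem]
      intro i j hi hj hij
      rw [h i hi, h j hj]
      have : (i : Int) < (j : Int) := by exact_mod_cast hij
      omega
    have hnds : s.Nodup := hpl.imp ne_of_lt
    have hnd : nums.Nodup := hperm.nodup_iff.mp hnds
    refine ⟨hnd, ?_⟩
    -- m = s[0]
    have hm0 : m = s[0]'hlpos := by
      have h1 : m ≤ s[0]'hlpos := hmle _ (hperm.mem_iff.mp (s.getElem_mem hlpos))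
      obtain ⟨j, hj, hjm⟩ := List.mem_iff_getElem.mp (hperm.mem_iff.mpr hmmem)
      have := h j hj
      rw [hgetD] at this
      have hj0 : (0 : Int) ≤ (j : Int) := by positivity
      omega
    -- M = s[0] + (len - 1)
    have hM : M = s[0]'hlpos + ((s.length : Int) - 1) := by
      obtain ⟨j, hj, hjM⟩ := List.mem_iff_getElem.mp (hperm.mem_iff.mpr hMmem)
      have hju := h j hj
      have hlst := h (s.length - 1) (by omega)
      have hge : s[s.length - 1]'(by omega) ≤ M :=
        hMge _ (hperm.mem_iff.mp (s.getElem_mem (by omega)))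
      rw [hgetD] at hju hlst
      have hjlt : (j : Int) ≤ (s.length : Int) - 1 := by
        have : j < s.length := hj; omega
      have hc : ((s.length - 1 : Nat) : Int) = (s.length : Int) - 1 := by omega
      rw [hc] at hlst
      omega
    rw [hm0, hM, hlen]
    ring
  · rintro ⟨hnd, hdiff⟩
    have hple : s.Pairwise (fun a b => a ≤ b) := PySem.List.sorted_pairwise nums (fun x => x)
    have hnds : s.Nodup := hperm.nodup_iff.mpr hnd
    have hpl : s.Pairwise (· < ·) := by
      rw [List.pairwise_iff_getElem] at *
      intro i j hi hj hij
      exact lt_of_le_of_ne (hple i j hi hj hij) (hnds.getElem_inj_iff.ne.mpr (by omega))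
    -- m = s[0]
    have hm0 : m = s[0]'hlpos := by
      have h1 : m ≤ s[0]'hlpos := hmle _ (hperm.mem_iff.mp (s.getElem_mem hlpos))
      obtain ⟨j, hj, hjm⟩ := List.mem_iff_getElem.mp (hperm.mem_iff.mpr hmmem)
      have := chainLe' s hpl 0 j (by omega) hj
      have hj0 : (0 : Int) ≤ ((j - 0 : Nat) : Int) := by positivity
      omega
    -- M = s[len-1]
    have hMl : M = s[s.length - 1]'(by omega) := by
      have h1 : s[s.length - 1]'(by omega) ≤ M :=
        hMge _ (hperm.mem_iff.mp (s.getElem_mem (by omega)))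
      obtain ⟨j, hj, hjM⟩ := List.mem_iff_getElem.mp (hperm.mem_iff.mpr hMmem)
      have := chainLe' s hpl j (s.length - 1) (by omega) (by omega)
      have : (0:Int) ≤ ((s.length - 1 - j : Nat) : Int) := by positivity
      omega
    intro k hk
    rw [hgetD]
    have hlow := chainLe' s hpl 0 k (by omega) hk
    have hup := chainLe' s hpl k (s.length - 1) (by omega) (by omega)
    have hcast1 : ((k - 0 : Nat) : Int) = (k : Int) := by omega
    have hcast2 : ((s.length - 1 - k : Nat) : Int) = (s.length : Int) - 1 - k := by omega
    rw [hcast1] at hlow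
    rw [hcast2] at hup
    rw [← hMl] at hup
    omega

-- ===== VERDICT (by name: the statement is the Claim_ definition above) =====
theorem rijtje_spec : Claim_equal_rijtje := by
  intro reeks _hdom _hpre
  unfold Spec_rijtje
  simp only [rijtje, rijtje_alt]
  by_cases hg3 : reeks.length < 3
  · rw [if_pos (Or.inr hg3 :
        (PySem.Set.ofList reeks).length ≠ reeks.length ∨ reeks.length < 3),
      if_pos (Or.inl hg3 :
        reeks.length < 3 ∨ (PySem.Set.ofList reeks).length ≠ reeks.length)]
  · by_cases hgs : (PySem.Set.ofList reeks).length = reeks.length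
    · have hA : ¬((PySem.Set.ofList reeks).length ≠ reeks.length ∨ reeks.length < 3) := by
        simp [hgs, hg3]
      have hB : ¬(reeks.length < 3 ∨ (PySem.Set.ofList reeks).length ≠ reeks.length) := by
        simp [hgs, hg3]
      rw [if_neg hA, if_neg hB]
      by_cases hall : (reeks.all fun e => PySem.Str.pyGet? e (-1) == PySem.Str.pyGet? (reeks.headD "") (-1)) = true
      · rw [if_pos hall]
        have hany : (reeks.any fun e => !(PySem.Str.pyGet? e (-1) == PySem.Str.pyGet? (reeks.headD "") (-1))) = false := by
          rw [← List.not_all_eq_any_not, hall]; rfl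
        have hBany : ¬((reeks.any fun e => !(PySem.Str.pyGet? e (-1) == PySem.Str.pyGet? (reeks.headD "") (-1))) = true) := by
          rw [hany]; exact Bool.false_ne_true
        rw [if_neg hBany]
        set nums := reeks.map (fun e => (PySem.Int.ofStr? (PySem.Str.slice e none (some (-1)))).getD 0) with hnums
        have hnl : nums.length = reeks.length := by simp [hnums]
        have hne : nums ≠ [] := by
          intro h
          rw [h] at hnl
          simp at hnl
          omega
        have hcore := core nums hne
        by_cases hL :
            (PySem.List.enumerate (PySem.List.sorted nums (fun x => x) false) 0).map
                (fun p => PySem.List.pyGetD (PySem.List.sorted nums (fun x => x) false) 0 0 + p.1)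
              = PySem.List.sorted nums (fun x => x) false
        · rw [if_neg (not_not_intro hL)]
          obtain ⟨hnd, hdiff⟩ := hcore.mp hL
          have h1 : (PySem.Set.ofList nums).length = nums.length := (setLen_eq_iff_nodup nums).mpr hnd
          symm
          rw [Bool.and_eq_true]
          refine ⟨beq_iff_eq.mpr (h1.trans hnl), ?_⟩
          rw [beq_iff_eq, ← hnl]
          exact hdiff
        · rw [if_pos hL]
          symm
          rw [Bool.eq_false_iff]
          intro hco
          rw [Bool.and_eq_true, beq_iff_eq, beq_iff_eq] at hco
          obtain ⟨h1, h2⟩ := hco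
          exact hL (hcore.mpr ⟨(setLen_eq_iff_nodup nums).mp (h1.trans hnl.symm), by rw [hnl]; exact h2⟩)
      · rw [if_neg hall]
        have hallf : (reeks.all fun e => PySem.Str.pyGet? e (-1) == PySem.Str.pyGet? (reeks.headD "") (-1)) = false :=
          Bool.eq_false_iff.mpr hall
        have hany : (reeks.any fun e => !(PySem.Str.pyGet? e (-1) == PySem.Str.pyGet? (reeks.headD "") (-1))) = true := by
          rw [← List.not_all_eq_any_not, hallf]; rfl
        rw [if_pos hany]
    · rw [if_pos (Or.inl hgs :
          (PySem.Set.ofList reeks).length ≠ reeks.length ∨ reeks.length < 3),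
        if_pos (Or.inr hgs :
          reeks.length < 3 ∨ (PySem.Set.ofList reeks).length ≠ reeks.length)]
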